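-- pv_equiv track=rewrite | github.com/pataluc/AoC | 2025/everybodyCodes/day06/ex.py | part2
-- ===== SOURCE A (Python) =====
-- def part2(professions: str) -> int:
--     mentor_count = {}
--     result = 0
--     for i in list(professions):
--         if i.isupper():
--             if i not in mentor_count:
--                 mentor_count[i] = 1
--             else:
--                 mentor_count[i] += 1
--         elif i.islower() and i.upper() in mentor_count:
--             result += mentor_count[i.upper()]
--     return result
-- ===== SOURCE B (Python) =====
-- def part2(professions: str) -> int:
--     # Staged passes: first gather the distinct uppercase letters in first-seen
--     # order, then for each letter do one plain scan with an integer running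
--     # count of that letter -- no dict of counters is ever maintained.
--     letters = list(dict.fromkeys(ch for ch in professions if ch.isupper()))
--     total = 0
--     for c in letters:
--         cnt = 0
--         for ch in professions:
--             if ch == c:
--                 cnt += 1
--             elif ch.islower() and ch.upper() == c:
--                 total += cnt
--     return total
-- ===== Notes on version B (the rewrite author's own statement) =====
-- stated objective: alternative
-- what changed: Replaces A's single pass with a dict of per-letter mentor counters by staged passes: first collect the distinct uppercase letters, then for each letter rescan the string with a plain integer running count of that letter, accumulating on matching lowercase chars; no dict of counters exists in B.
import Mathlib
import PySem

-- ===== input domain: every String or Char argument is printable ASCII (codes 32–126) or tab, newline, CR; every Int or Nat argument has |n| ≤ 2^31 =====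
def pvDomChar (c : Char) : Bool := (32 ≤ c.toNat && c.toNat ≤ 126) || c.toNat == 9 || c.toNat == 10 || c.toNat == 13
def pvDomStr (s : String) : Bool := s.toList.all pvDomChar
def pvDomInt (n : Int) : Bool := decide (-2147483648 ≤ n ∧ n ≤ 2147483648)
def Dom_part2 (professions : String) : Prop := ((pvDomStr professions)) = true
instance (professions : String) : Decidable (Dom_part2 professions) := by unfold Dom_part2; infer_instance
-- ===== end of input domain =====

-- B replaces A's single pass with a dict of counters by staged passes: one scan per
-- distinct uppercase letter with a plain integer running count (alternative; no dict).

-- ===== PORT A =====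
-- one loop iteration of A over (mentor_count, result)
def part2StepA (st : PySem.Dict Char Int × Int) (i : Char) : PySem.Dict Char Int × Int :=
  if PySem.Chars.isupper i then
    if st.1.contains i = false then (st.1.insert i 1, st.2)
    else (st.1.insert i (st.1.getD i 0 + 1), st.2)
  else if PySem.Chars.islower i && st.1.contains (PySem.Chars.upperChar i) then
    (st.1, st.2 + st.1.getD (PySem.Chars.upperChar i) 0)
  else st

def part2 (professions : String) : Int :=
  (professions.toList.foldl part2StepA (PySem.Dict.empty, 0)).2

-- ===== PORT B =====
-- one iteration of B's inner per-letter scan over (cnt, total)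
def part2InnerStep (c : Char) (st : Int × Int) (ch : Char) : Int × Int :=
  if ch = c then (st.1 + 1, st.2)
  else if PySem.Chars.islower ch && PySem.Chars.upperChar ch = c then (st.1, st.2 + st.1)
  else st

-- letters = list(dict.fromkeys(ch for ch in professions if ch.isupper()))
def part2_alt (professions : String) : Int :=
  let letters := PySem.List.dedup (professions.toList.filter PySem.Chars.isupper)
  letters.foldl (fun total c => (professions.toList.foldl (part2InnerStep c) (0, total)).2) 0

-- ===== PRECONDITION & SPEC =====
def Spec_part2 (professions : String) (out : Int) : Prop := out = part2_alt professions
instance (professions : String) (out : Int) : Decidable (Spec_part2 professions out) := by unfold Spec_part2; infer_instance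

-- ===== CLAIM (what is proved, stated in full; the proofs are below) =====
def Claim_equal_part2 : Prop := ∀ (professions : String), Dom_part2 professions → Spec_part2 professions (part2 professions)

-- ===== LEMMAS AND PROOFS =====

-- abstract A state: the dict viewed as its total lookup function
def pvBump (f : Char → Int) (c : Char) : Char → Int :=
  fun x => if x = c then f x + 1 else f x

def pvGA (st : (Char → Int) × Int) (c : Char) : (Char → Int) × Int :=
  if PySem.Chars.isupper c then (pvBump st.1 c, st.2)
  else (st.1, st.2 + (if PySem.Chars.islower c then st.1 (PySem.Chars.upperChar c) else 0))

-- pvM C t : number of lowercase chars in t whose uppercase form is C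
def pvM (c : Char) (t : List Char) : Int :=
  ((t.filter (fun y => PySem.Chars.islower y && PySem.Chars.upperChar y = c)).length : Int)

-- pvP l : the ordered (uppercase, later matching lowercase) pair count
def pvP : List Char → Int
  | [] => 0
  | c :: t => (if PySem.Chars.isupper c then pvM c t else 0) + pvP t

-- pvQ C l : the pairs of pvP restricted to uppercase letter C
def pvQ (C : Char) : List Char → Int
  | [] => 0
  | c :: t => (if c = C then pvM C t else 0) + pvQ C t

-- pvX f l : the credit the existing-uppercase function f earns from lowercase chars of l
def pvX (f : Char → Int) : List Char → Int
  | [] => 0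
  | c :: t => (if PySem.Chars.islower c then f (PySem.Chars.upperChar c) else 0) + pvX f t

theorem pv_not_both (c : Char) (h : PySem.Chars.islower c = true) :
    PySem.Chars.isupper c = false := by
  simp only [PySem.Chars.islower, PySem.Chars.isupper, Bool.and_eq_true, decide_eq_true_eq] at h ⊢
  by_contra hb
  rw [Bool.not_eq_false, Bool.and_eq_true, decide_eq_true_eq, decide_eq_true_eq] at hb
  exact absurd (le_trans h.1 hb.2) (by decide)

theorem pv_upper_not_lower (c : Char) (h : PySem.Chars.isupper c = true) :
    PySem.Chars.islower c = false := by
  by_contra hb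
  rw [Bool.not_eq_false] at hb
  exact absurd h (by simp [pv_not_both c hb])

-- dict simulation, A side
theorem pv_simA (l : List Char) (d : PySem.Dict Char Int) (r : Int) (f : Char → Int)
    (hf : ∀ x, d.getD x 0 = f x) :
    (l.foldl part2StepA (d, r)).2 = (l.foldl pvGA (f, r)).2 := by
  induction l generalizing d r f with
  | nil => rfl
  | cons c t ih =>
    simp only [List.foldl_cons]
    by_cases hu : PySem.Chars.isupper c = true
    · have hins : ∀ x, (d.insert c (d.getD c 0 + 1)).getD x 0 = pvBump f c x := by
        intro x
        rw [PySem.Dict.getD_insert]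
        simp only [pvBump, hf]
        split <;> simp_all
      by_cases hc : d.contains c = false
      · have h0 : d.getD c 0 = 0 := PySem.Dict.getD_of_not_contains d 0 hc
        have : part2StepA (d, r) c = (d.insert c 1, r) := by
          simp [part2StepA, hu, hc]
        rw [this]
        have : pvGA (f, r) c = (pvBump f c, r) := by simp [pvGA, hu]
        rw [this]
        have he : d.insert c 1 = d.insert c (d.getD c 0 + 1) := by rw [h0]; norm_num
        rw [he]
        exact ih _ _ _ hins
      · have : part2StepA (d, r) c = (d.insert c (d.getD c 0 + 1), r) := by
          simp [part2StepA, hu, hc]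
        rw [this]
        have : pvGA (f, r) c = (pvBump f c, r) := by simp [pvGA, hu]
        rw [this]
        exact ih _ _ _ hins
    · by_cases hl : PySem.Chars.islower c = true
      · by_cases hm : d.contains (PySem.Chars.upperChar c) = true
        · have : part2StepA (d, r) c = (d, r + d.getD (PySem.Chars.upperChar c) 0) := by
            simp [part2StepA, hu, hl, hm]
          rw [this]
          have : pvGA (f, r) c = (f, r + f (PySem.Chars.upperChar c)) := by
            simp [pvGA, hu, hl]
          rw [this, hf]
          exact ih _ _ _ hf
        · have h0 : d.getD (PySem.Chars.upperChar c) 0 = 0 :=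
            PySem.Dict.getD_of_not_contains d 0 (by simpa using hm)
          have : part2StepA (d, r) c = (d, r) := by
            simp [part2StepA, hu, hl, hm]
          rw [this]
          have : pvGA (f, r) c = (f, r + f (PySem.Chars.upperChar c)) := by
            simp [pvGA, hu, hl]
          rw [this, ← hf, h0, add_zero]
          exact ih _ _ _ hf
      · have : part2StepA (d, r) c = (d, r) := by simp [part2StepA, hu, hl]
        rw [this]
        have : pvGA (f, r) c = (f, r) := by simp [pvGA, hu, hl]
        rw [this]
        exact ih _ _ _ hf

theorem pvX_bump (c : Char) (t : List Char) (f : Char → Int) :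
    pvX (pvBump f c) t = pvX f t + pvM c t := by
  induction t with
  | nil => simp [pvX, pvM]
  | cons y s ih =>
    by_cases hl : PySem.Chars.islower y = true
    · by_cases he : PySem.Chars.upperChar y = c
      · simp only [pvX, pvM, List.filter_cons, hl, he, ih]
        simp [pvBump]
        ring
      · simp only [pvX, pvM, List.filter_cons, hl, ih]
        simp [pvBump, he]
        ring
    · simp only [pvX, pvM, List.filter_cons, hl, ih]
      simp

-- A's abstract fold: accumulator threading
theorem pv_foldA_eq (l : List Char) (f : Char → Int) (r : Int) :
    (l.foldl pvGA (f, r)).2 = r + pvP l + pvX f l := by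
  induction l generalizing f r with
  | nil => simp [pvP, pvX]
  | cons c t ih =>
    simp only [List.foldl_cons]
    by_cases hu : PySem.Chars.isupper c = true
    · have : pvGA (f, r) c = (pvBump f c, r) := by simp [pvGA, hu]
      rw [this, ih, pvX_bump]
      have hlc : PySem.Chars.islower c = false := pv_upper_not_lower c hu
      simp only [pvP, pvX, hu, hlc, if_true, Bool.false_eq_true, if_false]
      ring
    · have : pvGA (f, r) c =
        (f, r + (if PySem.Chars.islower c then f (PySem.Chars.upperChar c) else 0)) := by
        simp [pvGA, hu]
      rw [this, ih]
      simp only [pvP, pvX, hu, Bool.false_eq_true, if_false]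
      ring

theorem pvX_zero (l : List Char) : pvX (fun _ => (0 : Int)) l = 0 := by
  induction l with
  | nil => rfl
  | cons c t ih => simp [pvX, ih]

-- B's inner per-letter scan computes pvQ, threading cnt and total
theorem pv_inner (C : Char) (hC : PySem.Chars.isupper C = true) (l : List Char)
    (cnt t : Int) :
    (l.foldl (part2InnerStep C) (cnt, t)).2 = t + cnt * pvM C l + pvQ C l := by
  induction l generalizing cnt t with
  | nil => simp [pvM, pvQ]
  | cons c s ih =>
    simp only [List.foldl_cons]
    by_cases he : c = C
    · subst he
      have hlc : PySem.Chars.islower c = false := pv_upper_not_lower c hC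
      have : part2InnerStep c (cnt, t) c = (cnt + 1, t) := by simp [part2InnerStep]
      rw [this, ih]
      simp only [pvQ, pvM, List.filter_cons, hlc, Bool.false_and, Bool.false_eq_true,
        if_false, if_true]
      ring
    · by_cases hm : (PySem.Chars.islower c && PySem.Chars.upperChar c = C) = true
      · have : part2InnerStep C (cnt, t) c = (cnt, t + cnt) := by
          simp [part2InnerStep, he, hm]
        rw [this, ih]
        simp only [pvQ, pvM, List.filter_cons, hm, he, if_true, if_false, List.length_cons]
        push_cast
        ring
      · have : part2InnerStep C (cnt, t) c = (cnt, t) := by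
          simp only [part2InnerStep, he, if_false]
          rw [if_neg (by simp_all)]
        rw [this, ih]
        simp only [pvQ, pvM, List.filter_cons, he, if_false]
        rw [if_neg (by simp_all)]
        ring

-- B's outer fold adds up the per-letter counts
theorem pv_outer (l : List Char) (L : List Char) (hL : ∀ c ∈ L, PySem.Chars.isupper c = true)
    (t : Int) :
    L.foldl (fun total c => (l.foldl (part2InnerStep c) (0, total)).2) t
      = t + (L.map (fun c => pvQ c l)).sum := by
  induction L generalizing t with
  | nil => simp
  | cons C S ih =>
    simp only [List.foldl_cons, List.map_cons, List.sum_cons]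
    rw [pv_inner C (hL C (by simp)) l 0 t,
      ih (fun c hc => hL c (by simp [hc]))]
    ring

theorem pv_sum_ite (c : Char) (v : Char → Int) (L : List Char) (hn : L.Nodup) :
    (L.map (fun C => if c = C then v C else 0)).sum = if c ∈ L then v c else 0 := by
  induction L with
  | nil => simp
  | cons C S ih =>
    simp only [List.map_cons, List.sum_cons, List.nodup_cons] at *
    rw [ih hn.2]
    by_cases he : c = C
    · subst he
      simp [hn.1]
    · simp [he]

-- the pair count decomposes into per-letter counts over any nodup cover of the uppers
theorem pv_map_sum_add (L : List Char) (f g : Char → Int) :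
    (L.map (fun C => f C + g C)).sum = (L.map f).sum + (L.map g).sum := by
  induction L with
  | nil => simp
  | cons C S ih => simp only [List.map_cons, List.sum_cons, ih]; ring

theorem pv_decompose (l : List Char) (L : List Char) (hn : L.Nodup)
    (hcov : ∀ c, PySem.Chars.isupper c = true → c ∈ l → c ∈ L)
    (hup : ∀ c ∈ L, PySem.Chars.isupper c = true) :
    pvP l = (L.map (fun c => pvQ c l)).sum := by
  induction l with
  | nil =>
    simp [pvP, pvQ]
  | cons c t ih =>
    have hsplit : (L.map (fun C => pvQ C (c :: t))).sum
        = (L.map (fun C => if c = C then pvM C t else 0)).sum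
          + (L.map (fun C => pvQ C t)).sum := by
      rw [← pv_map_sum_add]
      simp only [pvQ]
    rw [hsplit, pv_sum_ite c (fun C => pvM C t) L hn,
      ← ih (fun x h1 h2 => hcov x h1 (by simp [h2]))]
    simp only [pvP]
    by_cases hu : PySem.Chars.isupper c = true
    · rw [if_pos (hcov c hu (by simp)), if_pos hu]
    · have hni : c ∉ L := fun hm => hu (hup c hm)
      rw [if_neg hni, if_neg hu]

-- ===== VERDICT (by name: the statement is the Claim_ definition above) =====
theorem part2_spec : Claim_equal_part2 := by
  intro s _
  unfold Spec_part2 part2 part2_alt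
  have hA : (s.toList.foldl part2StepA (PySem.Dict.empty, 0)).2 = pvP s.toList := by
    rw [pv_simA s.toList PySem.Dict.empty 0 (fun _ => 0)
      (fun x => by simp [PySem.Dict.getD_eq_get?_getD, PySem.Dict.get?_empty])]
    rw [pv_foldA_eq, pvX_zero]
    ring
  rw [hA]
  set L := PySem.List.dedup (s.toList.filter PySem.Chars.isupper) with hLdef
  have hup : ∀ c ∈ L, PySem.Chars.isupper c = true := by
    intro c hc
    rw [hLdef, PySem.List.mem_dedup] at hc
    exact (List.mem_filter.mp hc).2
  rw [pv_outer s.toList L hup 0, zero_add]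
  exact pv_decompose s.toList L (by rw [hLdef]; exact PySem.List.nodup_dedup _)
    (fun c h1 h2 => by rw [hLdef, PySem.List.mem_dedup]; exact List.mem_filter.mpr ⟨h2, h1⟩)
    hup
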